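-- pv_equiv track=rewrite | github.com/b34rmc/Coding-foundations | group projects/calculator/bi_calc_pro.py | clear0
-- ===== SOURCE A (Python) =====
-- def clear0(bin_num):
--     count = 0
--     max_len = len(bin_num)
--     for i in bin_num:
--         if i == '0':
--             count += 1
--         else:
--             break
--
--     new_string = ''
--     for i in range(count,max_len):
--         new_string = f"{new_string}{bin_num[i]}"
--
--     return(new_string)
-- ===== SOURCE B (Python) =====
-- def clear0(bin_num):
--     return bin_num.lstrip('0')
-- ===== Notes on version B (the rewrite author's own statement) =====
-- stated objective: idiomatic
-- what changed: Replaces the counting loop plus index-based quadratic string rebuild with a single str.lstrip('0') call.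
import Mathlib
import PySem

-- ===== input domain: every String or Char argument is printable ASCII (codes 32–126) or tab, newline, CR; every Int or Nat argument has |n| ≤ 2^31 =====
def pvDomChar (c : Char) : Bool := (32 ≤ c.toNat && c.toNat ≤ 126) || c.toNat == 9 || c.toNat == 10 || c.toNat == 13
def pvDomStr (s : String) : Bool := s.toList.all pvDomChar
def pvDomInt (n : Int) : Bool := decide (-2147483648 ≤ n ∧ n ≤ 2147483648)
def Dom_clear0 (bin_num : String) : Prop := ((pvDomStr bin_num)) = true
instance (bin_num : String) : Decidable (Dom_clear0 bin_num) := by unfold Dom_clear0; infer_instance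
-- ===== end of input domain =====

-- B replaces A's counting loop and index-by-index string rebuild with a single lstrip('0'); idiomatic.

-- ===== PORT A =====
-- A's first loop: count leading '0' characters, stopping at the first other character (the break).
def clear0Count : List Char → Nat
  | [] => 0
  | c :: cs => if c == '0' then clear0Count cs + 1 else 0

def clear0 (bin_num : String) : String :=
  let cs := bin_num.toList
  let count := clear0Count cs
  let max_len := cs.length
  -- A's second loop: for i in range(count, max_len): new_string = f"{new_string}{bin_num[i]}"
  -- index i is always in range here, so pyGetD's default is never reached
  let new_chars :=
    (PySem.List.pyRange (count : Int) (max_len : Int) 1).foldl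
      (fun acc i => acc ++ [PySem.List.pyGetD cs i ' ']) []
  String.ofList new_chars

-- ===== PORT B =====
-- Source B: return bin_num.lstrip('0'); ported by hand as dropWhile (· == '0'), which is exact:
-- lstrip('0') removes precisely the maximal leading run of '0' characters.
def clear0_alt (bin_num : String) : String :=
  String.ofList (bin_num.toList.dropWhile (fun c => c == '0'))

-- ===== PRECONDITION & SPEC =====
def Spec_clear0 (bin_num : String) (out : String) : Prop := out = clear0_alt bin_num
instance (bin_num : String) (out : String) : Decidable (Spec_clear0 bin_num out) := by unfold Spec_clear0; infer_instance

-- ===== CLAIM (what is proved, stated in full; the proofs are below) =====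
def Claim_equal_clear0 : Prop := ∀ (bin_num : String), Dom_clear0 bin_num → Spec_clear0 bin_num (clear0 bin_num)

-- ===== LEMMAS AND PROOFS =====
theorem drop_clear0Count (cs : List Char) :
    cs.drop (clear0Count cs) = cs.dropWhile (fun c => c == '0') := by
  induction cs with
  | nil => rfl
  | cons c cs ih =>
      by_cases h : c == '0' <;> simp [clear0Count, h, ih]

-- ===== VERDICT (by name: the statement is the Claim_ definition above) =====
theorem clear0_spec : Claim_equal_clear0 := by
  intro bin_num _
  show clear0 bin_num = clear0_alt bin_num
  simp only [clear0, clear0_alt]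
  rw [PySem.List.foldl_pyRange_pyGetD' bin_num.toList ' '
        (fun (acc : List Char) (c : Char) => acc ++ [c]) []
        (a := (clear0Count bin_num.toList : Int)) (Int.natCast_nonneg _),
      Int.toNat_natCast, PySem.List.foldl_append_singleton, drop_clear0Count, List.nil_append]
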